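-- pv_equiv track=rewrite | github.com/ioannis-papag/papageorgiou-uva-thesis-2024 | code/create_predicates_blocks/create_predicates_blocks.py | extract_all_predicates
-- ===== SOURCE A (Python) =====
-- def extract_all_predicates(objects, literals):
--     objects = sorted(objects)
--     all_predicates = []
--
--     for object_1 in objects:
--         all_predicates.append('holding(' + object_1 + ')')
--         all_predicates.append('clear(' + object_1 + ')')
--         all_predicates.append('ontable(' + object_1 + ')')
--
--     for object_1 in objects:
--         for object_2 in objects:
--             all_predicates.append('on(' + object_1 + ',' + object_2 + ')')
--
--     predicate_labels = [0 for item in all_predicates]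
--
--     literals_list = list(literals)
--     literals_string_list = []
--     for lit in literals_list:
--         literals_string_list.append(str(lit))
--     for i, predicate in enumerate(all_predicates):
--         if predicate in literals_string_list:
--             predicate_labels[i] = 1
--
--
--     return all_predicates, predicate_labels
-- ===== SOURCE B (Python) =====
-- def extract_all_predicates(objects, literals):
--     objs = sorted(objects)
--     all_predicates = [p for o in objs
--                       for p in ('holding(' + o + ')', 'clear(' + o + ')', 'ontable(' + o + ')')]
--     all_predicates += ['on(' + a + ',' + b + ')' for a in objs for b in objs]
--     index = {}
--     for i, p in enumerate(all_predicates):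
--         index.setdefault(p, []).append(i)
--     labels = [0] * len(all_predicates)
--     for lit in literals:
--         for i in index.get(str(lit), []):
--             labels[i] = 1
--     return all_predicates, labels
-- ===== Notes on version B (the rewrite author's own statement) =====
-- stated objective: faster
-- what changed: B builds the predicate list with comprehensions and replaces A's per-predicate linear scan of the literal list by a dict mapping each predicate string to its list of positions, then loops once over the literals marking every indexed position.
import Mathlib
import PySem

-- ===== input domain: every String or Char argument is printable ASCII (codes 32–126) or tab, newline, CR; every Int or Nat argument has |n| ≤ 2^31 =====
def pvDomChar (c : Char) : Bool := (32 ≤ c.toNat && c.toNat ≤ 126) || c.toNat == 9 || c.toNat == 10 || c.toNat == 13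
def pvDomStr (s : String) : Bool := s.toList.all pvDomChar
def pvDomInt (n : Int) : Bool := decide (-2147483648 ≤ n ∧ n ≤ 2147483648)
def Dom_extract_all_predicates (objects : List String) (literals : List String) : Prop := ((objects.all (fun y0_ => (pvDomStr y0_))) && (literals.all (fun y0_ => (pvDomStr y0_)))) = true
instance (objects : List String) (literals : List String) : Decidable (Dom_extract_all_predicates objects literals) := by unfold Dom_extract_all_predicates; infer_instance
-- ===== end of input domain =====

-- B replaces A's per-predicate scan of the literal list by a position-index dict looked up per literal; same return value.

-- ===== PORT A =====
-- literal port of A: sorted objects, appends in loops, zero labels, str() copy of the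
-- literals (str of a string is the string itself), then a membership test per predicate.
def extract_all_predicates (objects : List String) (literals : List String) : List String × List Int :=
  let objs := PySem.List.sorted objects (fun x => x) false
  let ap1 : List String := objs.foldl (fun acc o =>
      ((acc ++ ["holding(" ++ o ++ ")"]) ++ ["clear(" ++ o ++ ")"]) ++ ["ontable(" ++ o ++ ")"]) []
  let ap : List String := objs.foldl (fun acc o1 =>
      objs.foldl (fun acc2 o2 => acc2 ++ ["on(" ++ o1 ++ "," ++ o2 ++ ")"]) acc) ap1
  let labels0 : List Int := ap.map (fun _ => (0 : Int))
  let lits : List String := literals.foldl (fun acc l => acc ++ [l]) []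
  let labels : List Int := (PySem.List.enumerate ap 0).foldl
      (fun acc q => if lits.contains q.2 then PySem.List.pySetD acc q.1 1 else acc) labels0
  (ap, labels)

-- ===== PORT B =====
-- literal port of B: comprehensions for the predicates, a dict from predicate string to
-- its list of positions, then one pass over the literals marking every indexed position.
def extract_all_predicates_alt (objects : List String) (literals : List String) : List String × List Int :=
  let objs := PySem.List.sorted objects (fun x => x) false
  let ap : List String :=
    (objs.flatMap (fun o => ["holding(" ++ o ++ ")", "clear(" ++ o ++ ")", "ontable(" ++ o ++ ")"]))
      ++ objs.flatMap (fun a => objs.map (fun b => "on(" ++ a ++ "," ++ b ++ ")"))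
  let idx : PySem.Dict String (List Int) :=
    (PySem.List.enumerate ap 0).foldl (fun d q => d.modify q.2 [] (fun v => v ++ [q.1])) PySem.Dict.empty
  let labels : List Int := literals.foldl
      (fun lb lit => (idx.getD lit []).foldl (fun lb2 i => PySem.List.pySetD lb2 i 1) lb)
      (List.replicate ap.length (0 : Int))
  (ap, labels)

-- ===== PRECONDITION & SPEC =====
def Spec_extract_all_predicates (objects : List String) (literals : List String) (out : List String × List Int) : Prop := out = extract_all_predicates_alt objects literals
instance (objects : List String) (literals : List String) (out : List String × List Int) : Decidable (Spec_extract_all_predicates objects literals out) := by unfold Spec_extract_all_predicates; infer_instance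

-- ===== CLAIM (what is proved, stated in full; the proofs are below) =====
def Claim_equal_extract_all_predicates : Prop := ∀ (objects : List String) (literals : List String), Dom_extract_all_predicates objects literals → Spec_extract_all_predicates objects literals (extract_all_predicates objects literals)

-- ===== LEMMAS AND PROOFS =====

-- A's predicate-building loops produce B's comprehension lists.
lemma pv_ap_eq (objs : List String) :
    objs.foldl (fun acc o1 =>
      objs.foldl (fun acc2 o2 => acc2 ++ ["on(" ++ o1 ++ "," ++ o2 ++ ")"]) acc)
      (objs.foldl (fun acc o =>
        ((acc ++ ["holding(" ++ o ++ ")"]) ++ ["clear(" ++ o ++ ")"]) ++ ["ontable(" ++ o ++ ")"]) [])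
    = (objs.flatMap (fun o => ["holding(" ++ o ++ ")", "clear(" ++ o ++ ")", "ontable(" ++ o ++ ")"]))
      ++ objs.flatMap (fun a => objs.map (fun b => "on(" ++ a ++ "," ++ b ++ ")")) := by
  have h1 : objs.foldl (fun acc o =>
        ((acc ++ ["holding(" ++ o ++ ")"]) ++ ["clear(" ++ o ++ ")"]) ++ ["ontable(" ++ o ++ ")"]) []
      = objs.foldl (fun acc o =>
        acc ++ ["holding(" ++ o ++ ")", "clear(" ++ o ++ ")", "ontable(" ++ o ++ ")"]) [] := by
    apply PySem.List.foldl_congr_mem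
    intro acc x _
    simp
  have h2 : ∀ init : List String, objs.foldl (fun acc o1 =>
        objs.foldl (fun acc2 o2 => acc2 ++ ["on(" ++ o1 ++ "," ++ o2 ++ ")"]) acc) init
      = objs.foldl (fun acc o1 => acc ++ objs.map (fun b => "on(" ++ o1 ++ "," ++ b ++ ")")) init := by
    intro init
    apply PySem.List.foldl_congr_mem
    intro acc' x _
    exact PySem.List.foldl_append_singleton_eq_map _ _ _
  rw [h1, h2, PySem.List.foldl_append_eq_flatMap, PySem.List.foldl_append_eq_flatMap, List.nil_append]

-- a fold that sets position i to 1 for every i in L reads 1 exactly at the members of L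
-- (all indices in range).
lemma pv_mark_getElem? (L : List Int) (acc : List Int) (j : Nat)
    (hL : ∀ i ∈ L, 0 ≤ i ∧ i < (acc.length : Int)) :
    (L.foldl (fun a i => PySem.List.pySetD a i 1) acc)[j]? =
      if (j : Int) ∈ L then (if j < acc.length then some 1 else none) else acc[j]? := by
  induction L generalizing acc with
  | nil => simp
  | cons i L ih =>
    obtain ⟨hi0, hilt⟩ := hL i (by simp)
    have hset : PySem.List.pySetD acc i 1 = acc.set i.toNat 1 :=
      PySem.List.pySetD_of_nonneg _ _ hi0
    have hlen : (PySem.List.pySetD acc i 1).length = acc.length := by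
      rw [hset]; simp
    rw [List.foldl_cons, ih _ (by intro x hx; rw [hlen]; exact hL x (by simp [hx]))]
    rw [hlen, hset]
    by_cases hmem : (j : Int) ∈ L
    · have hm : (j : Int) ∈ i :: L := by simp [hmem]
      rw [if_pos hmem, if_pos hm]
    · rw [if_neg hmem]
      by_cases hji : (j : Int) = i
      · have hj : i.toNat = j := by omega
        have hjl : j < acc.length := by omega
        have hm : (j : Int) ∈ i :: L := by simp [hji]
        rw [if_pos hm, if_pos hjl, List.getElem?_set, if_pos hj, if_pos (by omega : i.toNat < acc.length)]
      · have hm : (j : Int) ∉ i :: L := by simp [hji, hmem]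
        rw [if_neg hm, List.getElem?_set, if_neg (by omega : ¬ i.toNat = j)]

-- A's conditional-set loop over the enumeration is the marking fold over the selected indices.
lemma pv_foldl_if_set_eq_mark (c : String → Bool) (ps : List (Int × String)) (acc : List Int) :
    ps.foldl (fun a q => if c q.2 then PySem.List.pySetD a q.1 1 else a) acc
    = (ps.filterMap (fun q => if c q.2 then some q.1 else none)).foldl
        (fun a i => PySem.List.pySetD a i 1) acc := by
  induction ps generalizing acc with
  | nil => rfl
  | cons q ps ih =>
    by_cases h : c q.2 <;> simp [h, ih]

-- B's nested loop is the marking fold over the concatenation of the looked-up index lists.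
lemma pv_foldl_nested_eq_mark (g : String → List Int) (ls : List String) (acc : List Int) :
    ls.foldl (fun lb lit => (g lit).foldl (fun lb2 i => PySem.List.pySetD lb2 i 1) lb) acc
    = (ls.flatMap g).foldl (fun a i => PySem.List.pySetD a i 1) acc := by
  induction ls generalizing acc with
  | nil => rfl
  | cons l ls ih => simp [List.flatMap_cons, List.foldl_append, ih]

-- the index dict of B: looked up, it yields exactly the positions of the key in ap.
lemma pv_idx_getD (ap : List String) (lit : String) :
    (((PySem.List.enumerate ap 0).foldl
        (fun d q => d.modify q.2 [] (fun v => v ++ [q.1])) PySem.Dict.empty).getD lit [])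
    = ((((PySem.List.enumerate ap 0).map (fun q => (q.2, q.1))).filter
        (fun p => p.1 == lit)).map (·.2)) := by
  have h : (PySem.List.enumerate ap 0).foldl
        (fun d q => d.modify q.2 [] (fun v => v ++ [q.1])) PySem.Dict.empty
      = ((PySem.List.enumerate ap 0).map (fun q => (q.2, q.1))).foldl
        (fun d p => d.modify p.1 [] (fun v => v ++ [p.2])) PySem.Dict.empty := by
    rw [List.foldl_map]
  rw [h, PySem.Dict.getD_foldl_modify_append]
  simp [PySem.Dict.getD_empty]

-- membership in A's selected-index list
lemma pv_memA (ap lits : List String) (x : Int) :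
    x ∈ (PySem.List.enumerate ap 0).filterMap (fun q => if lits.contains q.2 then some q.1 else none)
    ↔ ∃ k : Nat, ∃ _ : k < ap.length, (k : Int) = x ∧ ap[k] ∈ lits := by
  rw [List.mem_filterMap]
  constructor
  · rintro ⟨q, hql, hq⟩
    rw [PySem.List.mem_enumerate_iff] at hql
    obtain ⟨k, hk, rfl⟩ := hql
    by_cases hc : lits.contains ap[k]
    · rw [if_pos hc] at hq
      have hx : (0 : Int) + (k : Int) = x := by simpa using hq
      exact ⟨k, hk, by omega, List.contains_iff_mem.mp hc⟩
    · rw [if_neg hc] at hq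
      exact absurd hq (by simp)
  · rintro ⟨k, hk, rfl, hmem⟩
    refine ⟨((0 : Int) + (k : Int), ap[k]), ?_, ?_⟩
    · rw [PySem.List.mem_enumerate_iff]
      exact ⟨k, hk, rfl⟩
    · rw [if_pos (List.contains_iff_mem.mpr hmem)]
      simp

-- membership in B's concatenated looked-up index lists
lemma pv_memB (ap lits : List String) (x : Int) :
    x ∈ lits.flatMap (fun lit =>
        ((((PySem.List.enumerate ap 0).map (fun q => (q.2, q.1))).filter
          (fun p => p.1 == lit)).map (·.2)))
    ↔ ∃ k : Nat, ∃ _ : k < ap.length, (k : Int) = x ∧ ap[k] ∈ lits := by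
  rw [List.mem_flatMap]
  constructor
  · rintro ⟨lit, hlit, hx⟩
    rw [List.mem_map] at hx
    obtain ⟨p, hp, rfl⟩ := hx
    rw [List.mem_filter] at hp
    obtain ⟨hp1, hp2⟩ := hp
    rw [List.mem_map] at hp1
    obtain ⟨q, hq, rfl⟩ := hp1
    rw [PySem.List.mem_enumerate_iff] at hq
    obtain ⟨k, hk, rfl⟩ := hq
    have hlit' : ap[k] = lit := by simpa using hp2
    exact ⟨k, hk, by simp, hlit' ▸ hlit⟩
  · rintro ⟨k, hk, rfl, hmem⟩
    refine ⟨ap[k], hmem, ?_⟩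
    rw [List.mem_map]
    refine ⟨(ap[k], (0 : Int) + (k : Int)), ?_, by simp⟩
    rw [List.mem_filter]
    refine ⟨?_, by simp⟩
    rw [List.mem_map]
    refine ⟨((0 : Int) + (k : Int), ap[k]), ?_, rfl⟩
    rw [PySem.List.mem_enumerate_iff]
    exact ⟨k, hk, rfl⟩

-- the final values of two position-marking folds agree when the index lists have the same
-- members (all in range).
lemma pv_mark_ext (L1 L2 acc : List Int)
    (h1 : ∀ i ∈ L1, 0 ≤ i ∧ i < (acc.length : Int))
    (h2 : ∀ i ∈ L2, 0 ≤ i ∧ i < (acc.length : Int))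
    (hmem : ∀ x : Int, x ∈ L1 ↔ x ∈ L2) :
    L1.foldl (fun a i => PySem.List.pySetD a i 1) acc
    = L2.foldl (fun a i => PySem.List.pySetD a i 1) acc := by
  apply List.ext_getElem?
  intro j
  rw [pv_mark_getElem? _ _ _ h1, pv_mark_getElem? _ _ _ h2]
  simp only [hmem]

-- the two label computations agree
lemma pv_labels_eq (ap lits : List String) :
    (PySem.List.enumerate ap 0).foldl
      (fun acc q => if lits.contains q.2 then PySem.List.pySetD acc q.1 1 else acc)
      (ap.map (fun _ => (0 : Int)))
    = lits.foldl
      (fun lb lit =>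
        ((((PySem.List.enumerate ap 0).foldl
            (fun d q => d.modify q.2 [] (fun v => v ++ [q.1])) PySem.Dict.empty).getD lit []).foldl
          (fun lb2 i => PySem.List.pySetD lb2 i 1) lb))
      (List.replicate ap.length (0 : Int)) := by
  have hz : ap.map (fun _ => (0 : Int)) = List.replicate ap.length (0 : Int) := by
    simp [List.map_const']
  have hg : ∀ lit, (((PySem.List.enumerate ap 0).foldl
        (fun d q => d.modify q.2 [] (fun v => v ++ [q.1])) PySem.Dict.empty).getD lit [])
      = ((((PySem.List.enumerate ap 0).map (fun q => (q.2, q.1))).filter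
          (fun p => p.1 == lit)).map (·.2)) := pv_idx_getD ap
  rw [hz, pv_foldl_if_set_eq_mark]
  simp only [hg]
  rw [pv_foldl_nested_eq_mark]
  apply pv_mark_ext
  · intro i hi
    rw [pv_memA] at hi
    obtain ⟨k, hk, rfl, -⟩ := hi
    simp
    omega
  · intro i hi
    rw [pv_memB] at hi
    obtain ⟨k, hk, rfl, -⟩ := hi
    simp
    omega
  · intro x
    rw [pv_memA, pv_memB]

-- ===== VERDICT (by name: the statement is the Claim_ definition above) =====
theorem extract_all_predicates_spec : Claim_equal_extract_all_predicates := by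
  intro objects literals _
  unfold Spec_extract_all_predicates extract_all_predicates extract_all_predicates_alt
  have hlits : literals.foldl (fun acc l => acc ++ [l]) [] = literals := by
    rw [PySem.List.foldl_append_singleton_eq_self, List.nil_append]
  simp only [pv_ap_eq, hlits]
  exact congrArg _ (pv_labels_eq _ literals)
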